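-- pv_equiv track=rewrite | github.com/tneuqole/advent-of-code | 2024/day15.py | solve_down
-- ===== SOURCE A (Python) =====
-- def solve_down(grid, r, C):
--     r += 1
--
--     for c in C:
--         if r >= len(grid) or grid[r][c] == "#" or grid[r][c + 1] == "#":
--             return grid
--
--     s = False
--     new_C = set()
--     for c in C:
--         if grid[r][c] == "[":
--             new_C.add(c)
--             s = True
--         elif grid[r][c] == "]":
--             new_C.add(c - 1)
--             s = True
--
--         if grid[r][c + 1] == "[":
--             new_C.add(c + 1)
--             s = True
--
--     if s:
--         grid = solve_down(grid, r, new_C)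
--
--     replace = True
--     for c in C:
--         if not (grid[r][c] in ".@" and grid[r][c + 1] in ".@"):
--             replace = False
--             break
--     if replace:
--         for c in C:
--             grid[r][c] = "["
--             grid[r][c + 1] = "]"
--             grid[r - 1][c] = "."
--             grid[r - 1][c + 1] = "."
--
--     return grid
-- ===== SOURCE B (Python) =====
-- def solve_down(grid, r, C):
--     # Two-phase iteration instead of recursion; mutates grid in place like A.
--     # Phase 1: walk down row by row, collecting (row, columns) layers; abort
--     # unchanged on a wall (or falling off the grid).
--     layers = []
--     cur = list(C)
--     row = r
--     while True:
--         row += 1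
--         for c in cur:
--             if row >= len(grid) or grid[row][c] == "#" or grid[row][c + 1] == "#":
--                 return grid
--         layers.append((row, cur))
--         nxt = []
--         seen = set()
--         for c in cur:
--             if grid[row][c] == "[":
--                 if c not in seen:
--                     seen.add(c)
--                     nxt.append(c)
--             elif grid[row][c] == "]":
--                 if c - 1 not in seen:
--                     seen.add(c - 1)
--                     nxt.append(c - 1)
--             if grid[row][c + 1] == "[":
--                 if c + 1 not in seen:
--                     seen.add(c + 1)
--                     nxt.append(c + 1)
--         if not nxt:
--             break
--         cur = nxt
--     # Phase 2: apply layers deepest-first, each guarded by the same ".@" check.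
--     for row, cs in reversed(layers):
--         ok = True
--         for c in cs:
--             if not (grid[row][c] in ".@" and grid[row][c + 1] in ".@"):
--                 ok = False
--                 break
--         if ok:
--             for c in cs:
--                 grid[row][c] = "["
--                 grid[row][c + 1] = "]"
--                 grid[row - 1][c] = "."
--                 grid[row - 1][c + 1] = "."
--     return grid
-- ===== Notes on version B (the rewrite author's own statement) =====
-- stated objective: alternative
-- what changed: The recursion is replaced by a two-phase iteration: phase 1 walks down the rows collecting the (row, columns) layers to push and aborts unchanged on a wall, phase 2 applies the layers deepest-first, each guarded by the same '.@' destination check; in-place mutation of grid is preserved.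
-- outside the precondition, e.g. on solve_down([['.'], ['#']], 0, {0}): A returns [['.'], ['#']], B returns [['.'], ['#']]
import Mathlib
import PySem

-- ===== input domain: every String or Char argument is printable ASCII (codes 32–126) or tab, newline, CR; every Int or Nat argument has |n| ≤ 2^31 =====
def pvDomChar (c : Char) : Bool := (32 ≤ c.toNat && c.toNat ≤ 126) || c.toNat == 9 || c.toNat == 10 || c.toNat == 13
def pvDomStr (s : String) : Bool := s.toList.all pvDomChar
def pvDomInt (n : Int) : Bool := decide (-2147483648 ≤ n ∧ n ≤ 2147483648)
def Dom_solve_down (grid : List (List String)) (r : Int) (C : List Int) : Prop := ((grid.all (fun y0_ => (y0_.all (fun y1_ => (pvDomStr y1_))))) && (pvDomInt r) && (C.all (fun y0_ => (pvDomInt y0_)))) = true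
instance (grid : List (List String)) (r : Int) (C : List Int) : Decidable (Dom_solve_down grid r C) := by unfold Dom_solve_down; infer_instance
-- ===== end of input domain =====

-- B replaces A's recursion by a two-phase iteration (collect push layers going down,
-- then apply them deepest-first under the same destination check); both mutate the
-- grid in place in Python — the equivalence proved here is about the returned grid,
-- and both Pythons perform the same in-place writes.

-- ===== shared low-level ops (Python indexing / string ops, used by both ports) =====

-- grid[r][c] (negative indices wrap; none = IndexError)
def pvCell (g : List (List String)) (r c : Int) : Option String :=
  (PySem.List.pyGet? g r).bind (fun row => PySem.List.pyGet? row c)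

-- grid[r][c] = v (Python list assignment; out-of-range left unchanged — a totality
-- guard only: such inputs raise in Python and lie outside Pre_)
def pvSetCell (g : List (List String)) (r c : Int) (v : String) : List (List String) :=
  match PySem.List.pyGet? g r with
  | none => g
  | some row => PySem.List.pySetD g r (PySem.List.pySetD row c v)

-- Python 'x in ".@"' is a SUBSTRING test; the substrings of ".@" are exactly these
-- four strings, so this is exact.
def pvInDotAt (s : String) : Bool := s == "" || s == "." || s == "@" || s == ".@"

-- grid[r][c] in ".@" (false on IndexError: outside Pre_)
def pvDotCell (g : List (List String)) (r c : Int) : Bool :=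
  match pvCell g r c with
  | none => false
  | some s => pvInDotAt s

-- the early-abort loop: r >= len(grid) or grid[r][c] == "#" or grid[r][c+1] == "#"
def pvAbort (g : List (List String)) (r : Int) (C : List Int) : Bool :=
  C.any (fun c => decide ((PySem.List.len g) ≤ r) || (pvCell g r c == some "#") || (pvCell g r (c + 1) == some "#"))

-- the replace check loop over C (early break does not change the value)
def pvCheck (g : List (List String)) (r : Int) (C : List Int) : Bool :=
  C.all (fun c => pvDotCell g r c && pvDotCell g r (c + 1))

-- the write loop: grid[r][c]="[", grid[r][c+1]="]", grid[r-1][c]=".", grid[r-1][c+1]="."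
def pvWrite (g : List (List String)) (r : Int) (C : List Int) : List (List String) :=
  C.foldl (fun g c =>
    pvSetCell (pvSetCell (pvSetCell (pvSetCell g r c "[") r (c + 1) "]") (r - 1) c ".") (r - 1) (c + 1) ".") g

-- ===== PORT A =====

-- A's 'for c in C' building (s, new_C); new_C is a Python set = PySem.Set
def pvStepA (g : List (List String)) (r : Int) (acc : Bool × PySem.Set Int) (c : Int) :
    Bool × PySem.Set Int :=
  let acc :=
    if pvCell g r c == some "[" then (true, PySem.Set.add acc.2 c)
    else if pvCell g r c == some "]" then (true, PySem.Set.add acc.2 (c - 1))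
    else acc
  if pvCell g r (c + 1) == some "[" then (true, PySem.Set.add acc.2 (c + 1)) else acc

def pvCollectA (g : List (List String)) (r : Int) (C : List Int) : Bool × PySem.Set Int :=
  C.foldl (pvStepA g r) (false, PySem.Set.empty)

-- fuel = recursion depth bound (grid.length + 1 suffices on Pre_; a totality guard)
def pvSolveA (fuel : Nat) (g : List (List String)) (r : Int) (C : List Int) : List (List String) :=
  match fuel with
  | 0 => g
  | fuel + 1 =>
    let r := r + 1
    if pvAbort g r C then g
    else
      let sc := pvCollectA g r C
      let g := if sc.1 then pvSolveA fuel g r sc.2 else g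
      if pvCheck g r C then pvWrite g r C else g

def solve_down (grid : List (List String)) (r : Int) (C : List Int) : List (List String) :=
  pvSolveA (grid.length + 1) grid r C

-- ===== PORT B =====

-- Source B's seen/nxt pair: nxt keeps first occurrences in order = PySem.Set insertion order
def pvStepB (g : List (List String)) (r : Int) (nxt : PySem.Set Int) (c : Int) : PySem.Set Int :=
  let nxt :=
    if pvCell g r c == some "[" then PySem.Set.add nxt c
    else if pvCell g r c == some "]" then PySem.Set.add nxt (c - 1)
    else nxt
  if pvCell g r (c + 1) == some "[" then PySem.Set.add nxt (c + 1) else nxt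

def pvCollectB (g : List (List String)) (r : Int) (C : List Int) : PySem.Set Int :=
  C.foldl (pvStepB g r) PySem.Set.empty

-- phase 1: collect the layers (row, columns) top-down; none = aborted on a wall
def pvPhase1 (fuel : Nat) (g : List (List String)) (row : Int) (cur : List Int) :
    Option (List (Int × List Int)) :=
  match fuel with
  | 0 => none
  | fuel + 1 =>
    let row := row + 1
    if pvAbort g row cur then none
    else
      let nxt := pvCollectB g row cur
      if nxt.isEmpty then some [(row, cur)]
      else (pvPhase1 fuel g row nxt).map (fun ls => (row, cur) :: ls)

-- phase 2 body: one layer, guarded by the '.@' check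
def pvApplyLayer (g : List (List String)) (l : Int × List Int) : List (List String) :=
  if pvCheck g l.1 l.2 then pvWrite g l.1 l.2 else g

def solve_down_alt (grid : List (List String)) (r : Int) (C : List Int) : List (List String) :=
  match pvPhase1 (grid.length + 1) grid r C with
  | none => grid
  | some ls => ls.reverse.foldl pvApplyLayer grid

-- ===== PRECONDITION & SPEC =====

-- every '[' is immediately followed by ']' and every ']' immediately preceded by '['
def pvWellFormedRow (row : List String) : Bool :=
  (List.range row.length).all (fun i =>
    (row.getD i "" == "[" → decide (i + 1 < row.length) && (row.getD (i + 1) "" == "]")) &&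
    (row.getD i "" == "]" → decide (0 < i) && (row.getD (i - 1) "" == "[")))

-- Pre_ excludes the inputs on which A raises IndexError (rows or columns outside the
-- grid reached by the push recursion) and, conservatively, ill-formed grids (cells
-- breaking the '[' ']' box pairing), on which A's iteration/write order over a Python
-- set of adjacent box columns is accidental hash order; this also excludes some
-- ill-formed inputs on which A happens to return the grid unchanged (see cites).
def Pre_solve_down (grid : List (List String)) (r : Int) (C : List Int) : Prop :=
  C = [] ∨ (grid.length : Int) ≤ r + 1 ∨
  (-(grid.length : Int) ≤ r ∧
   grid.all (fun row => row.length = (grid.headI).length) = true ∧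
   grid.all pvWellFormedRow = true ∧
   ∀ c ∈ C, 0 ≤ c ∧ c + 1 < ((grid.headI).length : Int))

instance (grid : List (List String)) (r : Int) (C : List Int) : Decidable (Pre_solve_down grid r C) := by
  unfold Pre_solve_down; infer_instance

def pvWitness_solve_down : List (List String) × Int × List Int :=
  ([[".", ".", ".", "."], [".", "[", "]", "."], [".", ".", ".", "."]], 0, [1])

def Spec_solve_down (grid : List (List String)) (r : Int) (C : List Int) (out : List (List String)) : Prop := out = solve_down_alt grid r C
instance (grid : List (List String)) (r : Int) (C : List Int) (out : List (List String)) : Decidable (Spec_solve_down grid r C out) := by unfold Spec_solve_down; infer_instance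

-- ===== CLAIM (what is proved, stated in full; the proofs are below) =====
def Claim_equal_solve_down : Prop := ∀ (grid : List (List String)) (r : Int) (C : List Int), Dom_solve_down grid r C → Pre_solve_down grid r C → Spec_solve_down grid r C (solve_down grid r C)

-- ===== LEMMAS AND PROOFS =====

-- adding to a set yields a nonempty set
theorem pvSet_add_ne_nil (s : PySem.Set Int) (x : Int) : PySem.Set.add s x ≠ [] := by
  unfold PySem.Set.add
  split
  · intro h; subst h; simp at *
  · simp

-- A's flag s is true exactly when new_C is nonempty, and the sets coincide
theorem pvCollect_inv (g : List (List String)) (r : Int) (C : List Int)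
    (acc : Bool × PySem.Set Int) (h : acc.1 = true ↔ acc.2 ≠ []) :
    ((C.foldl (pvStepA g r) acc).1 = true ↔ (C.foldl (pvStepA g r) acc).2 ≠ []) := by
  induction C generalizing acc with
  | nil => simpa using h
  | cons c C ih =>
    simp only [List.foldl_cons]
    apply ih
    unfold pvStepA
    dsimp only
    split
    · exact ⟨fun _ => pvSet_add_ne_nil _ _, fun _ => rfl⟩
    · split
      · exact ⟨fun _ => pvSet_add_ne_nil _ _, fun _ => rfl⟩
      · split
        · exact ⟨fun _ => pvSet_add_ne_nil _ _, fun _ => rfl⟩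
        · exact h

theorem pvCollectA_fst_iff (g : List (List String)) (r : Int) (C : List Int) :
    (pvCollectA g r C).1 = true ↔ (pvCollectA g r C).2 ≠ [] := by
  unfold pvCollectA
  exact pvCollect_inv g r C (false, PySem.Set.empty) (by simp [PySem.Set.empty])

-- A's pair fold projects to B's set fold
theorem pvCollect_snd_gen (g : List (List String)) (r : Int) (C : List Int)
    (acc : Bool × PySem.Set Int) :
    (C.foldl (pvStepA g r) acc).2 = C.foldl (pvStepB g r) acc.2 := by
  induction C generalizing acc with
  | nil => rfl
  | cons c C ih =>
    simp only [List.foldl_cons]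
    rw [ih]
    congr 1
    unfold pvStepA pvStepB
    dsimp only
    by_cases h1 : (pvCell g r c == some "[") = true <;>
      by_cases h2 : (pvCell g r c == some "]") = true <;>
        by_cases h3 : (pvCell g r (c + 1) == some "[") = true <;>
          simp [h1, h2, h3]

theorem pvCollectA_snd (g : List (List String)) (r : Int) (C : List Int) :
    (pvCollectA g r C).2 = pvCollectB g r C := by
  unfold pvCollectA pvCollectB
  exact pvCollect_snd_gen g r C (false, PySem.Set.empty)

-- if the flag is true, some c in C saw a box cell, so the '.@' check on the
-- UNCHANGED grid fails (abort propagation)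
theorem pvCollect_true_witness_gen (g : List (List String)) (r : Int) (C : List Int)
    (acc : Bool × PySem.Set Int) (ha : acc.1 = false)
    (hf : (C.foldl (pvStepA g r) acc).1 = true) :
    ∃ c ∈ C, pvCell g r c = some "[" ∨ pvCell g r c = some "]" ∨ pvCell g r (c + 1) = some "[" := by
  induction C generalizing acc with
  | nil => simp only [List.foldl_nil] at hf; rw [hf] at ha; cases ha
  | cons c C ih =>
    simp only [List.foldl_cons] at hf
    by_cases h1 : pvCell g r c = some "[" ∨ pvCell g r c = some "]" ∨ pvCell g r (c + 1) = some "["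
    · exact ⟨c, List.mem_cons_self, h1⟩
    · push Not at h1
      obtain ⟨e1, e2, e3⟩ := h1
      have hstep : pvStepA g r acc c = acc := by
        simp [pvStepA, e1, e2, e3]
      rw [hstep] at hf
      obtain ⟨c', hc', hb⟩ := ih acc ha hf
      exact ⟨c', List.mem_cons_of_mem _ hc', hb⟩

theorem pvCollect_true_witness (g : List (List String)) (r : Int) (C : List Int)
    (h : (pvCollectA g r C).1 = true) :
    ∃ c ∈ C, pvCell g r c = some "[" ∨ pvCell g r c = some "]" ∨ pvCell g r (c + 1) = some "[" :=
  pvCollect_true_witness_gen g r C (false, PySem.Set.empty) rfl h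

theorem pvCheck_false_of_box (g : List (List String)) (r : Int) (C : List Int)
    (h : (pvCollectA g r C).1 = true) : pvCheck g r C = false := by
  obtain ⟨c, hc, hb⟩ := pvCollect_true_witness g r C h
  unfold pvCheck
  rw [List.all_eq_false]
  refine ⟨c, hc, ?_⟩
  rcases hb with h1 | h1 | h1 <;> simp [pvDotCell, h1, pvInDotAt]

-- the main bridge: A's fuelled recursion = phase1 + deepest-first application
theorem pvMain (fuel : Nat) : ∀ (g : List (List String)) (r : Int) (C : List Int),
    pvSolveA fuel g r C =
      (match pvPhase1 fuel g r C with
       | none => g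
       | some ls => ls.reverse.foldl pvApplyLayer g) := by
  induction fuel with
  | zero => intro g r C; rfl
  | succ fuel ih =>
    intro g r C
    rw [pvSolveA, pvPhase1]
    dsimp only
    by_cases hab : pvAbort g (r + 1) C = true
    · simp [hab]
    · have hsnd := pvCollectA_snd g (r + 1) C
      by_cases hs : (pvCollectA g (r + 1) C).1 = true
      · have hne : (pvCollectB g (r + 1) C).isEmpty = false := by
          simp only [List.isEmpty_eq_false_iff, ← hsnd]
          exact (pvCollectA_fst_iff g (r + 1) C).mp hs
        cases hp : pvPhase1 fuel g (r + 1) (pvCollectB g (r + 1) C) with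
        | none =>
          have hA : pvSolveA fuel g (r + 1) (pvCollectA g (r + 1) C).2 = g := by
            rw [hsnd, ih, hp]
          have hcf := pvCheck_false_of_box g (r + 1) C hs
          simp [hab, hs, hne, hA, hcf]
        | some ls =>
          have hA : pvSolveA fuel g (r + 1) (pvCollectA g (r + 1) C).2 =
              ls.reverse.foldl pvApplyLayer g := by
            rw [hsnd, ih, hp]
          simp [hab, hs, hne, hA, pvApplyLayer]
      · have hne : (pvCollectB g (r + 1) C).isEmpty = true := by
          simp only [List.isEmpty_iff, ← hsnd]
          by_contra hx
          exact hs ((pvCollectA_fst_iff g (r + 1) C).mpr hx)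
        simp [hab, hs, hne, pvApplyLayer]

-- ===== VERDICT (by name: the statement is the Claim_ definition above) =====
theorem solve_down_spec : Claim_equal_solve_down := by
  intro grid r C _hdom _hpre
  unfold Spec_solve_down solve_down solve_down_alt
  exact pvMain (grid.length + 1) grid r C
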